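-- pv_equiv track=rewrite | github.com/kumailxp/robust-sma-optimizer | backtest_sma_optimisation.py | group_nearby_values
-- ===== SOURCE A (Python) =====
-- def group_nearby_values(data_list, max_gap):
--     """Finds groups of nearby values in a list.
--
--     Args:
--         data_list (list): The list of numerical values.
--         max_gap (float): The maximum difference between two adjacent
--                          values to be considered in the same group.
--
--     Returns:
--         list: A list of lists, where each inner list is a group.
--
--     """
--     if not data_list:
--         return []
--
--     # 1. Sort the list (crucial step for grouping nearby values)
--     sorted_list = sorted(data_list)
--
--     # Initialize the list of groups and the first group
--     groups = []
--     current_group = [sorted_list[0]]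
--
--     # 2. Iterate and group
--     for i in range(1, len(sorted_list)):
--         # Check if the gap to the previous value is within the threshold
--         if sorted_list[i] - sorted_list[i - 1] <= max_gap:
--             current_group.append(sorted_list[i])
--         else:
--             # The gap is too large; start a new group
--             groups.append(current_group)
--             current_group = [sorted_list[i]]
--
--     # 3. Add the last group
--     groups.append(current_group)
--
--     return groups
-- ===== SOURCE B (Python) =====
-- def group_nearby_values(data_list, max_gap):
--     """Two-phase regrouping: find break indices in the sorted list, then slice."""
--     if not data_list:
--         return []
--     s = sorted(data_list)
--     breaks = [i for i in range(1, len(s)) if s[i] - s[i - 1] > max_gap]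
--     bounds = [0] + breaks + [len(s)]
--     return [s[a:b] for a, b in zip(bounds, bounds[1:])]
-- ===== Notes on version B (the rewrite author's own statement) =====
-- stated objective: alternative
-- what changed: Replaces the single-pass running-buffer accumulation with a two-phase decomposition: first compute the list of break indices where the sorted gap exceeds max_gap, then slice the sorted list between consecutive cut points.
import Mathlib
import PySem

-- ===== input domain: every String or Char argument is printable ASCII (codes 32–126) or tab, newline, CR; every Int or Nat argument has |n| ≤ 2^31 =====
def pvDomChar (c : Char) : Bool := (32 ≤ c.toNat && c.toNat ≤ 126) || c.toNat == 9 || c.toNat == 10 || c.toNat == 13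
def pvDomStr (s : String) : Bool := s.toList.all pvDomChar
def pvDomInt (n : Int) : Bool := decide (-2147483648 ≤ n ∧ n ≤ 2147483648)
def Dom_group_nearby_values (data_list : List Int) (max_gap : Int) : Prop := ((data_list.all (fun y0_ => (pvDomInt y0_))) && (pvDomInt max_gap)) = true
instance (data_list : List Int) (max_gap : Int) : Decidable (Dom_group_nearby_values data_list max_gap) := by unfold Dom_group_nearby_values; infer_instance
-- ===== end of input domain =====

-- B replaces A's running-buffer accumulation with a two-phase "find break indices, then slice" decomposition; same results, similar cost.

-- ===== PORT A =====
-- literal port of A: sort, then a fold over range(1, len) maintaining (groups, current_group)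
def group_nearby_values (data_list : List Int) (max_gap : Int) : List (List Int) :=
  if data_list = [] then []
  else
    let sorted_list := PySem.List.sorted data_list (fun x => x) false
    let st :=
      (PySem.List.pyRange 1 (sorted_list.length : Int) 1).foldl
        (fun st i =>
          if PySem.List.pyGetD sorted_list i 0 - PySem.List.pyGetD sorted_list (i - 1) 0 ≤ max_gap
          then (st.1, st.2 ++ [PySem.List.pyGetD sorted_list i 0])
          else (st.1 ++ [st.2], [PySem.List.pyGetD sorted_list i 0]))
        (([] : List (List Int)), [PySem.List.pyGetD sorted_list 0 0])
    st.1 ++ [st.2]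

-- ===== PORT B =====
-- literal port of Source B: break indices by filter, cut points, slices between consecutive cut points
def group_nearby_values_alt (data_list : List Int) (max_gap : Int) : List (List Int) :=
  if data_list = [] then []
  else
    let s := PySem.List.sorted data_list (fun x => x) false
    let breaks :=
      (PySem.List.pyRange 1 (s.length : Int) 1).filter
        (fun i => max_gap < PySem.List.pyGetD s i 0 - PySem.List.pyGetD s (i - 1) 0)
    let bounds := 0 :: (breaks ++ [(s.length : Int)])
    (bounds.zip (PySem.List.slice bounds (some 1) none)).map
      (fun ab => PySem.List.slice s (some ab.1) (some ab.2))

-- ===== PRECONDITION & SPEC =====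
def Spec_group_nearby_values (data_list : List Int) (max_gap : Int) (out : List (List Int)) : Prop := out = group_nearby_values_alt data_list max_gap
instance (data_list : List Int) (max_gap : Int) (out : List (List Int)) : Decidable (Spec_group_nearby_values data_list max_gap out) := by unfold Spec_group_nearby_values; infer_instance

-- ===== CLAIM (what is proved, stated in full; the proofs are below) =====
def Claim_equal_group_nearby_values : Prop := ∀ (data_list : List Int) (max_gap : Int), Dom_group_nearby_values data_list max_gap → Spec_group_nearby_values data_list max_gap (group_nearby_values data_list max_gap)

-- ===== LEMMAS AND PROOFS =====

lemma pvZip_tail_snoc {α : Type} (l : List α) (y : α) (h : l ≠ []) :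
    (l ++ [y]).zip (l ++ [y]).tail = l.zip l.tail ++ [(l.getLast h, y)] := by
  induction l with
  | nil => simp at h
  | cons a t ih =>
    cases t with
    | nil => simp
    | cons b t' =>
      have := ih (by simp)
      simp only [List.cons_append, List.tail_cons, List.zip_cons_cons] at this ⊢
      rw [this]
      simp [List.getLast]

lemma pvSlice_append_of_le (s : List Int) (x : Int) (a b : Int)
    (ha : 0 ≤ a) (han : a ≤ (s.length : Int)) (hb : 0 ≤ b) (hbn : b ≤ (s.length : Int)) :
    PySem.List.slice (s ++ [x]) (some a) (some b) = PySem.List.slice s (some a) (some b) := by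
  rw [PySem.List.slice_toNat _ ha hb, PySem.List.slice_toNat _ ha hb]
  rw [List.drop_append_of_le_length (by omega)]
  rw [List.take_append_of_le_length (by simp; omega)]

lemma pvSlice_last_append (s : List Int) (x : Int) (a : Int)
    (ha : 0 ≤ a) (han : a ≤ (s.length : Int)) :
    PySem.List.slice (s ++ [x]) (some a) (some ((s.length : Int) + 1)) =
      PySem.List.slice s (some a) (some (s.length : Int)) ++ [x] := by
  rw [PySem.List.slice_toNat _ ha (by omega), PySem.List.slice_toNat _ ha (by omega)]
  rw [List.drop_append_of_le_length (by omega)]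
  have h1 : ((s.length : Int) + 1).toNat - a.toNat = (s.length - a.toNat) + 1 := by omega
  have h2 : ((s.length : Int)).toNat - a.toNat = s.length - a.toNat := by omega
  have e1 : List.take (s.length - a.toNat + 1) (List.drop a.toNat s ++ [x]) = List.drop a.toNat s ++ [x] :=
    List.take_of_length_le (by simp only [List.length_append, List.length_drop, List.length_cons, List.length_nil]; omega)
  have e2 : List.take (s.length - a.toNat) (List.drop a.toNat s) = List.drop a.toNat s :=
    List.take_of_length_le (by simp)
  rw [h1, h2, e1, e2]

def pvBreaks (s : List Int) (g : Int) : List Int :=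
  (PySem.List.pyRange 1 (s.length : Int) 1).filter
    (fun i => g < PySem.List.pyGetD s i 0 - PySem.List.pyGetD s (i - 1) 0)

lemma pvGetD_append (s : List Int) (x : Int) (i : Int) (h0 : 0 ≤ i) (hn : i < (s.length : Int)) :
    PySem.List.pyGetD (s ++ [x]) i 0 = PySem.List.pyGetD s i 0 := by
  have hc : i = ((i.toNat : Nat) : Int) := by omega
  rw [hc, PySem.List.pyGetD_natCast, PySem.List.pyGetD_natCast,
      List.getD_eq_getElem?_getD, List.getD_eq_getElem?_getD,
      List.getElem?_append_left (by omega)]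

lemma pvGetD_append_last (s : List Int) (x : Int) :
    PySem.List.pyGetD (s ++ [x]) (s.length : Int) 0 = x := by
  rw [PySem.List.pyGetD_natCast, List.getD_eq_getElem?_getD, List.getElem?_concat_length]
  rfl

lemma pvGetD_append_pred (s : List Int) (x : Int) (h : s ≠ []) :
    PySem.List.pyGetD (s ++ [x]) ((s.length : Int) - 1) 0 = s.getLast h := by
  have hl : 0 < s.length := List.length_pos_iff.mpr h
  have hc : (s.length : Int) - 1 = ((s.length - 1 : Nat) : Int) := by omega
  rw [hc, PySem.List.pyGetD_natCast, List.getD_eq_getElem?_getD,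
      List.getElem?_append_left (by omega), List.getElem?_eq_getElem (by omega)]
  simp [List.getLast_eq_getElem]

lemma pvBreaks_snoc (s : List Int) (x : Int) (g : Int) (h : s ≠ []) :
    pvBreaks (s ++ [x]) g =
      pvBreaks s g ++ (if g < x - s.getLast h then [(s.length : Int)] else []) := by
  have hl : 0 < s.length := List.length_pos_iff.mpr h
  unfold pvBreaks
  have hlen : (((s ++ [x]).length : Nat) : Int) = (s.length : Int) + 1 := by simp
  rw [hlen, PySem.List.pyRange_one_succ_right (by omega), List.filter_append]
  congr 1
  · apply List.filter_congr
    intro i hi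
    have hmem := (PySem.List.mem_pyRange_one).mp hi
    rw [pvGetD_append s x i (by omega) (by omega),
        pvGetD_append s x (i - 1) (by omega) (by omega)]
  · rw [List.filter_cons, List.filter_nil]
    rw [pvGetD_append_last, pvGetD_append_pred s x h]
    split_ifs with h1 h2 h2 <;> simp_all

def pvALoop (s : List Int) (g : Int) : List (List Int) × List Int :=
  (PySem.List.pyRange 1 (s.length : Int) 1).foldl
    (fun st i =>
      if PySem.List.pyGetD s i 0 - PySem.List.pyGetD s (i - 1) 0 ≤ g
      then (st.1, st.2 ++ [PySem.List.pyGetD s i 0])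
      else (st.1 ++ [st.2], [PySem.List.pyGetD s i 0]))
    (([] : List (List Int)), [PySem.List.pyGetD s 0 0])

lemma pvALoop_snoc (s : List Int) (x : Int) (g : Int) (h : s ≠ []) :
    pvALoop (s ++ [x]) g =
      (if x - s.getLast h ≤ g
       then ((pvALoop s g).1, (pvALoop s g).2 ++ [x])
       else ((pvALoop s g).1 ++ [(pvALoop s g).2], [x])) := by
  have hl : 0 < s.length := List.length_pos_iff.mpr h
  unfold pvALoop
  have hlen : (((s ++ [x]).length : Nat) : Int) = (s.length : Int) + 1 := by simp
  rw [hlen, PySem.List.pyRange_one_succ_right (by omega), List.foldl_append]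
  have h0 : PySem.List.pyGetD (s ++ [x]) 0 0 = PySem.List.pyGetD s 0 0 :=
    pvGetD_append s x 0 (by omega) (by omega)
  rw [h0]
  have hcongr :
      (PySem.List.pyRange 1 (s.length : Int) 1).foldl
        (fun (st : List (List Int) × List Int) i =>
          if PySem.List.pyGetD (s ++ [x]) i 0 - PySem.List.pyGetD (s ++ [x]) (i - 1) 0 ≤ g
          then (st.1, st.2 ++ [PySem.List.pyGetD (s ++ [x]) i 0])
          else (st.1 ++ [st.2], [PySem.List.pyGetD (s ++ [x]) i 0]))
        (([] : List (List Int)), [PySem.List.pyGetD s 0 0]) =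
      (PySem.List.pyRange 1 (s.length : Int) 1).foldl
        (fun (st : List (List Int) × List Int) i =>
          if PySem.List.pyGetD s i 0 - PySem.List.pyGetD s (i - 1) 0 ≤ g
          then (st.1, st.2 ++ [PySem.List.pyGetD s i 0])
          else (st.1 ++ [st.2], [PySem.List.pyGetD s i 0]))
        (([] : List (List Int)), [PySem.List.pyGetD s 0 0]) := by
    apply PySem.List.foldl_congr_mem
    intro acc i hi
    have hmem := (PySem.List.mem_pyRange_one).mp hi
    rw [pvGetD_append s x i (by omega) (by omega),
        pvGetD_append s x (i - 1) (by omega) (by omega)]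
  rw [hcongr]
  simp only [List.foldl_cons, List.foldl_nil]
  rw [pvGetD_append_last, pvGetD_append_pred s x h]

lemma pvBreaks_mem (s : List Int) (g : Int) {i : Int} (hi : i ∈ pvBreaks s g) :
    1 ≤ i ∧ i < (s.length : Int) := by
  unfold pvBreaks at hi
  have := List.mem_filter.mp hi
  exact (PySem.List.mem_pyRange_one).mp this.1

def pvBCore (s : List Int) (g : Int) : List (List Int) :=
  ((0 :: (pvBreaks s g ++ [(s.length : Int)])).zip
      (PySem.List.slice (0 :: (pvBreaks s g ++ [(s.length : Int)])) (some 1) none)).map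
    (fun ab => PySem.List.slice s (some ab.1) (some ab.2))

def pvBFront (s : List Int) (g : Int) : List (List Int) :=
  ((0 :: pvBreaks s g).zip (0 :: pvBreaks s g).tail).map
    (fun ab => PySem.List.slice s (some ab.1) (some ab.2))

def pvBLast (s : List Int) (g : Int) : List Int :=
  PySem.List.slice s (some ((0 :: pvBreaks s g).getLast (by simp))) (some (s.length : Int))

lemma pvBCore_split (s : List Int) (g : Int) :
    pvBCore s g = pvBFront s g ++ [pvBLast s g] := by
  unfold pvBCore pvBFront pvBLast
  rw [PySem.List.slice_from_one]
  have : (0 : Int) :: (pvBreaks s g ++ [(s.length : Int)]) =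
      (0 :: pvBreaks s g) ++ [(s.length : Int)] := by simp
  rw [this, pvZip_tail_snoc (0 :: pvBreaks s g) _ (by simp), List.map_append]
  rfl

lemma pvBoundMem (s : List Int) (g : Int) {a : Int} (ha : a ∈ 0 :: pvBreaks s g) :
    0 ≤ a ∧ a ≤ (s.length : Int) := by
  rcases List.mem_cons.mp ha with h | h
  · subst h; exact ⟨le_refl 0, Int.natCast_nonneg _⟩
  · have := pvBreaks_mem s g h; omega

lemma pvInv (g : Int) (s : List Int) (h : s ≠ []) :
    pvALoop s g = (pvBFront s g, pvBLast s g) := by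
  induction s using List.reverseRecOn with
  | nil => exact absurd rfl h
  | append_singleton s x ih =>
    by_cases hs : s = []
    · subst hs
      simp only [List.nil_append]
      unfold pvALoop pvBFront pvBLast pvBreaks
      norm_num [PySem.List.pyRange_one_eq_nil, PySem.List.pyGetD_zero_cons]
      rw [PySem.List.slice_to _ (by omega)]
      rfl
    · have hl : 0 < s.length := List.length_pos_iff.mpr hs
      rw [pvALoop_snoc s x g hs, ih hs]
      have hbr := pvBreaks_snoc s x g hs
      have hlen : (((s ++ [x]).length : Nat) : Int) = (s.length : Int) + 1 := by simp
      by_cases hc : x - s.getLast hs ≤ g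
      · rw [if_pos hc]
        have hext : pvBreaks (s ++ [x]) g = pvBreaks s g := by
          rw [hbr, if_neg (by omega)]; simp
        have hfront : pvBFront (s ++ [x]) g = pvBFront s g := by
          unfold pvBFront
          rw [hext]
          apply List.map_congr_left
          intro ab hab
          have h1 := (List.of_mem_zip hab).1
          have h2 := List.mem_of_mem_tail (List.of_mem_zip hab).2
          have b1 := pvBoundMem s g h1
          have b2 := pvBoundMem s g h2
          exact pvSlice_append_of_le s x ab.1 ab.2 b1.1 b1.2 b2.1 b2.2
        have hlastc : pvBLast (s ++ [x]) g = pvBLast s g ++ [x] := by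
          unfold pvBLast
          have hb := pvBoundMem s g (List.getLast_mem (l := 0 :: pvBreaks s g) (by simp))
          simp only [hext, hlen]
          exact pvSlice_last_append s x _ hb.1 hb.2
        rw [hfront, hlastc]
      · rw [if_neg hc]
        have hext : pvBreaks (s ++ [x]) g = pvBreaks s g ++ [(s.length : Int)] := by
          rw [hbr, if_pos (by omega)]
        have hcons : (0 : Int) :: pvBreaks (s ++ [x]) g =
            (0 :: pvBreaks s g) ++ [(s.length : Int)] := by rw [hext]; simp
        have hfront : pvBFront (s ++ [x]) g = pvBFront s g ++ [pvBLast s g] := by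
          unfold pvBFront
          rw [hcons, pvZip_tail_snoc (0 :: pvBreaks s g) _ (by simp), List.map_append]
          congr 1
          · apply List.map_congr_left
            intro ab hab
            have h1 := (List.of_mem_zip hab).1
            have h2 := List.mem_of_mem_tail (List.of_mem_zip hab).2
            have b1 := pvBoundMem s g h1
            have b2 := pvBoundMem s g h2
            exact pvSlice_append_of_le s x ab.1 ab.2 b1.1 b1.2 b2.1 b2.2
          · simp only [List.map_cons, List.map_nil]
            unfold pvBLast
            have hb := pvBoundMem s g (List.getLast_mem (l := 0 :: pvBreaks s g) (by simp))
            rw [pvSlice_append_of_le s x _ _ hb.1 hb.2 (by omega) (by omega)]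
        have hlastc : pvBLast (s ++ [x]) g = [x] := by
          unfold pvBLast
          have hgl : ((0:Int) :: pvBreaks (s ++ [x]) g).getLast (by simp) = (s.length : Int) := by
            simp [hcons]
          rw [hgl, hlen, pvSlice_last_append s x _ (by omega) (by omega)]
          rw [PySem.List.slice_toNat _ (by omega) (by omega)]
          simp
        rw [hfront, hlastc]

lemma pvMain (g : Int) (s : List Int) (h : s ≠ []) :
    (pvALoop s g).1 ++ [(pvALoop s g).2] = pvBCore s g := by
  rw [pvInv g s h, pvBCore_split]

-- ===== VERDICT (by name: the statement is the Claim_ definition above) =====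
theorem group_nearby_values_spec : Claim_equal_group_nearby_values := by
  intro data_list max_gap _
  unfold Spec_group_nearby_values group_nearby_values group_nearby_values_alt
  by_cases hd : data_list = []
  · simp [hd]
  · simp only [if_neg hd]
    have hs : PySem.List.sorted data_list (fun x => x) false ≠ [] := by
      intro hE
      have := PySem.List.sorted_perm data_list (fun x : Int => x) false
      rw [hE] at this
      exact hd (List.Perm.nil_eq this).symm
    exact pvMain max_gap _ hs
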